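-- pv_equiv track=rewrite | github.com/yian-bian/python-code3 | proportional_representation.py | eliminate_n_ballots_for
-- ===== SOURCE A (Python) =====
-- def eliminate_n_ballots_for(ballots, to_eliminate, n):
--     '''(lst, str) -> lst
--     Remove n of the ballots in ballots where the first choice is for the candidate to_eliminate.
--
--     Provided to students. Do not edit.
--
--     >>> ballots = [['GREEN1', 'GREEN2', 'GREEN3'], ['GREEN1', 'GREEN2', 'GREEN3'], ['NDP3', 'NDP1', 'NDP2', 'GREEN1', 'GREEN2'], ['NDP3', 'NDP1', 'NDP2', 'GREEN1', 'GREEN2'], ['GREEN1', 'NDP1', 'GREEN2', 'GREEN3'], ['GREEN1', 'NDP1', 'GREEN2', 'GREEN3'], ['GREEN1', 'NDP1', 'GREEN2', 'GREEN3']]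
--     >>> eliminate_n_ballots_for(ballots, ['GREEN1'], 1)
--     [['GREEN1', 'GREEN2', 'GREEN3'], ['NDP3', 'NDP1', 'NDP2', 'GREEN1', 'GREEN2'], ['NDP3', 'NDP1', 'NDP2', 'GREEN1', 'GREEN2'], ['GREEN1', 'NDP1', 'GREEN2', 'GREEN3'], ['GREEN1', 'NDP1', 'GREEN2', 'GREEN3'], ['GREEN1', 'NDP1', 'GREEN2', 'GREEN3']]
--     >>> eliminate_n_ballots_for(ballots, ['GREEN1'], 2)
--     [['NDP3', 'NDP1', 'NDP2', 'GREEN1', 'GREEN2'], ['NDP3', 'NDP1', 'NDP2', 'GREEN1', 'GREEN2'], ['GREEN1', 'NDP1', 'GREEN2', 'GREEN3'], ['GREEN1', 'NDP1', 'GREEN2', 'GREEN3'], ['GREEN1', 'NDP1', 'GREEN2', 'GREEN3']]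
--     >>> eliminate_n_ballots_for(ballots, ['NDP3'], 2)
--     [['GREEN1', 'GREEN2', 'GREEN3'], ['GREEN1', 'GREEN2', 'GREEN3'], ['GREEN1', 'NDP1', 'GREEN2', 'GREEN3'], ['GREEN1', 'NDP1', 'GREEN2', 'GREEN3'], ['GREEN1', 'NDP1', 'GREEN2', 'GREEN3']]
--     >>> eliminate_n_ballots_for(ballots, ['NDP3'], 1)
--     [['GREEN1', 'GREEN2', 'GREEN3'], ['GREEN1', 'GREEN2', 'GREEN3'], ['NDP3', 'NDP1', 'NDP2', 'GREEN1', 'GREEN2'], ['GREEN1', 'NDP1', 'GREEN2', 'GREEN3'], ['GREEN1', 'NDP1', 'GREEN2', 'GREEN3'], ['GREEN1', 'NDP1', 'GREEN2', 'GREEN3']]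
--     >>> eliminate_n_ballots_for(ballots, ['NDP3', 'GREEN1'], 5)
--     [['GREEN1', 'NDP1', 'GREEN2', 'GREEN3'], ['GREEN1', 'NDP1', 'GREEN2', 'GREEN3']]
--     >>> b = [['GREEN1', 'GREEN2', 'GREEN3', 'NDP1', 'NDP2', 'NDP3', 'BLOC1'], ['GREEN1', 'GREEN2', 'GREEN3', 'NDP1', 'NDP2', 'NDP3', 'BLOC1'], ['GREEN1', 'GREEN2', 'GREEN3', 'NDP1', 'NDP2', 'NDP3', 'BLOC1'], ['GREEN1', 'GREEN2', 'GREEN3', 'NDP1', 'NDP2', 'NDP3', 'BLOC1'], ['GREEN1', 'GREEN2', 'GREEN3', 'NDP1', 'NDP2', 'NDP3', 'BLOC1'], ['NDP1', 'NDP2', 'GREEN1', 'GREEN2', 'NDP3', 'BLOC1', 'NDP3'], ['NDP1', 'NDP2', 'GREEN1', 'GREEN2', 'NDP3', 'BLOC1', 'NDP3'], ['NDP1', 'NDP2', 'GREEN1', 'GREEN2', 'NDP3', 'BLOC1', 'NDP3']]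
--     >>> eliminate_n_ballots_for(b, ['GREEN1'], 2)
--     [['GREEN1', 'GREEN2', 'GREEN3', 'NDP1', 'NDP2', 'NDP3', 'BLOC1'], ['GREEN1', 'GREEN2', 'GREEN3', 'NDP1', 'NDP2', 'NDP3', 'BLOC1'], ['GREEN1', 'GREEN2', 'GREEN3', 'NDP1', 'NDP2', 'NDP3', 'BLOC1'], ['NDP1', 'NDP2', 'GREEN1', 'GREEN2', 'NDP3', 'BLOC1', 'NDP3'], ['NDP1', 'NDP2', 'GREEN1', 'GREEN2', 'NDP3', 'BLOC1', 'NDP3'], ['NDP1', 'NDP2', 'GREEN1', 'GREEN2', 'NDP3', 'BLOC1', 'NDP3']]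
--     '''
--     quota = n
--     new_ballots = []
--     elims = 0
--     for i,b in enumerate(ballots):
--         if (elims >= quota) or  (len(b) > 0 and b[0] not in to_eliminate):
--             new_ballots.append(b)
--         else:
--             elims += 1
--     return new_ballots
-- ===== SOURCE B (Python) =====
-- def eliminate_n_ballots_for(ballots, to_eliminate, n):
--     # Repeated-deletion algorithm: up to n times, find the first ballot whose
--     # top choice is eliminated (or which is empty) and delete it; stop early
--     # when no such ballot remains.
--     result = list(ballots)
--     for _ in range(n):
--         for i, b in enumerate(result):
--             if len(b) == 0 or b[0] in to_eliminate:
--                 del result[i]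
--                 break
--         else:
--             break
--     return result
-- ===== Notes on version B (the rewrite author's own statement) =====
-- stated objective: alternative
-- what changed: B replaces A's single counter-driven scan by a repeated-deletion algorithm: an outer loop runs up to n times, each iteration searching for and deleting the first ballot that is empty or headed by an eliminated candidate, stopping early when none remains.
import Mathlib
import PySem

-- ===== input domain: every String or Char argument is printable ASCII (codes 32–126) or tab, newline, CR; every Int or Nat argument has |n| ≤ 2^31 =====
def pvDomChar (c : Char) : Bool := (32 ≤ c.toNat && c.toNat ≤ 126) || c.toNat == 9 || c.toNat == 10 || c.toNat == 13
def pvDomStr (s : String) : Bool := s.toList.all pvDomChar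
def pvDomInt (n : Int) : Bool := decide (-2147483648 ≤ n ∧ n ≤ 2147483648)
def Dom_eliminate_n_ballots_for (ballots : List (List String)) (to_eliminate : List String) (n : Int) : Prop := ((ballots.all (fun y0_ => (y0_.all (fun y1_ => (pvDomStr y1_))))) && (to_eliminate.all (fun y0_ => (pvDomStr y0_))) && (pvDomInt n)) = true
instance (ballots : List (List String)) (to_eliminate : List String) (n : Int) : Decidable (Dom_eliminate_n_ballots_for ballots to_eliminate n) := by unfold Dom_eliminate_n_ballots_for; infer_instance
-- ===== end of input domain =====

-- B (alternative, same result): instead of A's single counter-driven scan, B repeatedly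
-- (up to n times) searches for and deletes the first droppable ballot, stopping early.
-- ===== PORT A =====
-- A: one fused loop; the enumerate index i is unused in A's body, so the fold is over the ballots directly.
def eliminate_n_ballots_for (ballots : List (List String)) (to_eliminate : List String) (n : Int) : List (List String) :=
  (ballots.foldl (fun (st : List (List String) × Int) b =>
      if st.2 ≥ n ∨ (b ≠ [] ∧ b.headI ∉ to_eliminate)
      then (st.1 ++ [b], st.2)
      else (st.1, st.2 + 1)) ([], 0)).1

-- ===== PORT B =====
-- B's inner 'for i, b in enumerate(result): … del result[i]; break / else break':
-- returns the list with the first droppable ballot deleted, or none if there is none (→ break).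
def pvDelFirst (to_eliminate : List String) : List (List String) → Option (List (List String))
  | [] => none
  | b :: rest =>
    if b = [] ∨ b.headI ∈ to_eliminate
    then some rest
    else (pvDelFirst to_eliminate rest).map (b :: ·)

-- B's outer 'for _ in range(n)' loop (range(n) is empty for n ≤ 0, hence fuel n.toNat).
def pvRepeatDel (to_eliminate : List String) : Nat → List (List String) → List (List String)
  | 0, bs => bs
  | k + 1, bs =>
    match pvDelFirst to_eliminate bs with
    | none => bs
    | some bs' => pvRepeatDel to_eliminate k bs'

def eliminate_n_ballots_for_alt (ballots : List (List String)) (to_eliminate : List String) (n : Int) : List (List String) :=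
  pvRepeatDel to_eliminate n.toNat ballots

-- ===== PRECONDITION & SPEC =====
def Spec_eliminate_n_ballots_for (ballots : List (List String)) (to_eliminate : List String) (n : Int) (out : List (List String)) : Prop := out = eliminate_n_ballots_for_alt ballots to_eliminate n
instance (ballots : List (List String)) (to_eliminate : List String) (n : Int) (out : List (List String)) : Decidable (Spec_eliminate_n_ballots_for ballots to_eliminate n out) := by unfold Spec_eliminate_n_ballots_for; infer_instance

-- ===== CLAIM (what is proved, stated in full; the proofs are below) =====
def Claim_equal_eliminate_n_ballots_for : Prop := ∀ (ballots : List (List String)) (to_eliminate : List String) (n : Int), Dom_eliminate_n_ballots_for ballots to_eliminate n → Spec_eliminate_n_ballots_for ballots to_eliminate n (eliminate_n_ballots_for ballots to_eliminate n)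

-- ===== LEMMAS AND PROOFS =====

-- Reference function: drop the first k droppable ballots in one scan.
def pvDropK (e : List String) : Nat → List (List String) → List (List String)
  | 0, bs => bs
  | _ + 1, [] => []
  | k + 1, b :: rest =>
    if b = [] ∨ b.headI ∈ e
    then pvDropK e k rest
    else b :: pvDropK e (k + 1) rest

theorem pvDropK_nil (e : List String) (k : Nat) : pvDropK e k [] = [] := by
  cases k <;> rfl

theorem pvDropK_cons_keep (e : List String) (k : Nat) (b : List String) (rest : List (List String))
    (h : ¬ (b = [] ∨ b.headI ∈ e)) :
    pvDropK e k (b :: rest) = b :: pvDropK e k rest := by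
  cases k with
  | zero => simp [pvDropK]
  | succ k => simp [pvDropK, h]

-- A's fold, started from (acc, c), equals acc ++ pvDropK (n - c).toNat.
theorem pvA_eq_dropK (e : List String) (n : Int) :
    ∀ (bs : List (List String)) (acc : List (List String)) (c : Int),
      (bs.foldl (fun (st : List (List String) × Int) b =>
          if st.2 ≥ n ∨ (b ≠ [] ∧ b.headI ∉ e)
          then (st.1 ++ [b], st.2)
          else (st.1, st.2 + 1)) (acc, c)).1
        = acc ++ pvDropK e (n - c).toNat bs := by
  intro bs
  induction bs with
  | nil => intro acc c; simp [pvDropK_nil]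
  | cons b rest ih =>
    intro acc c
    by_cases hc : c ≥ n
    · have hK : (n - c).toNat = 0 := by omega
      simp only [List.foldl_cons, if_pos (Or.inl hc)]
      rw [ih (acc ++ [b]) c, hK]
      simp [pvDropK]
    · have hK : (n - c).toNat = (n - (c + 1)).toNat + 1 := by omega
      by_cases hd : b = [] ∨ b.headI ∈ e
      · have hk : ¬ (c ≥ n ∨ (b ≠ [] ∧ b.headI ∉ e)) := by
          rintro (h | ⟨hne, hni⟩)
          · exact hc h
          · rcases hd with h | h
            · exact hne h
            · exact hni h
        simp only [List.foldl_cons, if_neg hk]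
        rw [ih acc (c + 1), hK]
        simp [pvDropK, hd]
      · push Not at hd
        have hk : c ≥ n ∨ (b ≠ [] ∧ b.headI ∉ e) := Or.inr hd
        simp only [List.foldl_cons, if_pos hk]
        rw [ih (acc ++ [b]) c]
        rw [pvDropK_cons_keep e _ b rest (by push Not; exact hd)]
        simp

-- Deleting the first droppable ballot commutes past a kept head.
theorem pvRepeatDel_cons_keep (e : List String) (b : List String) (h : ¬ (b = [] ∨ b.headI ∈ e)) :
    ∀ (k : Nat) (rest : List (List String)),
      pvRepeatDel e k (b :: rest) = b :: pvRepeatDel e k rest := by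
  intro k
  induction k with
  | zero => intro rest; rfl
  | succ k ih =>
    intro rest
    simp only [pvRepeatDel, pvDelFirst, if_neg h]
    cases hr : pvDelFirst e rest with
    | none => simp
    | some bs' => simp [ih]

-- B's repeated deletion computes the same one-scan drop of the first k droppables.
theorem pvB_eq_dropK (e : List String) :
    ∀ (bs : List (List String)) (k : Nat),
      pvRepeatDel e k bs = pvDropK e k bs := by
  intro bs
  induction bs with
  | nil =>
    intro k
    cases k with
    | zero => rfl
    | succ k => simp [pvRepeatDel, pvDelFirst, pvDropK]
  | cons b rest ih =>
    intro k
    by_cases hd : b = [] ∨ b.headI ∈ e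
    · cases k with
      | zero => rfl
      | succ k =>
        simp only [pvRepeatDel, pvDelFirst, if_pos hd]
        rw [ih k]
        simp [pvDropK, hd]
    · rw [pvRepeatDel_cons_keep e b hd k rest, ih k, pvDropK_cons_keep e k b rest hd]

-- ===== VERDICT (by name: the statement is the Claim_ definition above) =====
theorem eliminate_n_ballots_for_spec : Claim_equal_eliminate_n_ballots_for := by
  intro ballots to_eliminate n _
  unfold Spec_eliminate_n_ballots_for eliminate_n_ballots_for eliminate_n_ballots_for_alt
  rw [pvB_eq_dropK]
  have := pvA_eq_dropK to_eliminate n ballots [] 0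
  simpa using this
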